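-- pv_equiv track=rewrite | github.com/kroitlong/my_code | machina_learning_basic_algorithm/Supervised_Learning_Advanced_Learning_Algorithm/my_package/tool.py | expand_expression
-- ===== SOURCE A (Python) =====
-- import copy
-- from itertools import combinations_with_replacement
-- from functools import reduce
-- from operator import mul
--
-- def expand_expression(input_x, dim):
--     """
--
--     :param input_x: 输入的线性表达式的值，默认为list[x1,x2,...]
--     :param dim: 扩展的维度
--     :return: 扩展后的线性表达式,即list[1次方的全部组合到n次方的全部组合的线性组合]
--     """
--     output_x = copy.deepcopy(input_x)
--     for i in range(dim - 1):
--         result_list = list(combinations_with_replacement(input_x, i + 2))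
--         for value in result_list:
--             temp = reduce(mul, value)
--             output_x.append(temp)
--         del result_list
--     return output_x
-- ===== SOURCE B (Python) =====
-- def expand_expression(input_x, dim):
--     # Incremental construction: degree-(k+1) products are built from the flat
--     # list of degree-k products with one multiplication per emitted term,
--     # using per-position offsets into that list (no tuple building, no reduce).
--     output = list(input_x)
--     cur = list(input_x)                # degree-k products, lexicographic order
--     start = list(range(len(input_x)))  # start[j]: index in cur of first product over suffix input_x[j:]
--     for _ in range(dim - 1):
--         new = []
--         new_start = []
--         for xj, sj in zip(input_x, start):
--             new_start.append(len(new))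
--             new.extend([xj * p for p in cur[sj:]])
--         output += new
--         cur, start = new, new_start
--     return output
-- ===== Notes on version B (the rewrite author's own statement) =====
-- stated objective: faster
-- what changed: Instead of materialising each combination tuple via itertools and folding reduce(mul) over it, B builds the flat list of degree-(k+1) products from the flat list of degree-k products with one multiplication per emitted term, keeping per-position offsets into that list.
import Mathlib
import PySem

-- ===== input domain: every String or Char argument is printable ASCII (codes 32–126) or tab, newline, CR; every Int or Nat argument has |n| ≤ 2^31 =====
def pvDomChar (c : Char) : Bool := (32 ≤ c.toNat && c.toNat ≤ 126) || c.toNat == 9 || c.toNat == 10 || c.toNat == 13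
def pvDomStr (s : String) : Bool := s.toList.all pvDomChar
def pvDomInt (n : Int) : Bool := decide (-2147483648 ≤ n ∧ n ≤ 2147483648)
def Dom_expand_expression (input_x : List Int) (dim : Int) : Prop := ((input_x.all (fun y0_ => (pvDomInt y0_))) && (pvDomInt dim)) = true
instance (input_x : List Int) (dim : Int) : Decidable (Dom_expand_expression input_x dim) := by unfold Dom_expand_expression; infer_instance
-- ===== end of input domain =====

-- B replaces itertools.combinations_with_replacement + reduce(mul) by an incremental
-- scheme computing each degree-(k+1) product with one multiplication from the flat
-- degree-k product list, via per-position offsets into that list (objective: faster).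


-- ===== PORT A =====
-- itertools.combinations_with_replacement(l, r), in itertools' lexicographic order
def cwr (l : List Int) (r : Nat) : List (List Int) :=
  match r, l with
  | 0, _ => [[]]
  | _ + 1, [] => []
  | r + 1, x :: xs => (cwr (x :: xs) r).map (fun c => x :: c) ++ cwr xs (r + 1)
termination_by (r, l.length)

-- reduce(mul, value); A never applies it to an empty tuple (sizes are ≥ 2 and the
-- combination list is empty when input_x is), so the [] value is arbitrary
def reduceMul : List Int → Int
  | [] => 1
  | x :: xs => xs.foldl (· * ·) x

-- body of 'for i in range(dim - 1)'
def stepA (input_x : List Int) (out : List Int) (i : Int) : List Int :=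
  out ++ (cwr input_x (i + 2).toNat).map reduceMul

def expand_expression (input_x : List Int) (dim : Int) : List Int :=
  (PySem.List.pyRange 0 (dim - 1) 1).foldl (stepA input_x) input_x

-- ===== PORT B =====
-- body of 'for xj, sj in zip(input_x, start)': extend new with xj * p for p in cur[sj:],
-- recording len(new) (taken before extending) in new_start
def innerStepB (cur : List Int) (acc : List Int × List Int) (pr : Int × Int) :
    List Int × List Int :=
  (acc.1 ++ (PySem.List.slice cur (some pr.2) none).map (fun p => pr.1 * p),
   acc.2 ++ [(acc.1.length : Int)])

-- body of 'for _ in range(dim - 1)': state is (output, cur, start)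
def stepB (x : List Int) (st : List Int × List Int × List Int) (_i : Int) :
    List Int × List Int × List Int :=
  let inner := (x.zip st.2.2).foldl (innerStepB st.2.1) ([], [])
  (st.1 ++ inner.1, inner.1, inner.2)

def expand_expression_alt (input_x : List Int) (dim : Int) : List Int :=
  ((PySem.List.pyRange 0 (dim - 1) 1).foldl (stepB input_x)
    (input_x, input_x, PySem.List.pyRange 0 (input_x.length : Int) 1)).1

-- ===== PRECONDITION & SPEC =====
def Spec_expand_expression (input_x : List Int) (dim : Int) (out : List Int) : Prop := out = expand_expression_alt input_x dim
instance (input_x : List Int) (dim : Int) (out : List Int) : Decidable (Spec_expand_expression input_x dim out) := by unfold Spec_expand_expression; infer_instance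

-- ===== CLAIM (what is proved, stated in full; the proofs are below) =====
def Claim_equal_expand_expression : Prop := ∀ (input_x : List Int) (dim : Int), Dom_expand_expression input_x dim → Spec_expand_expression input_x dim (expand_expression input_x dim)

-- ===== LEMMAS AND PROOFS =====

-- products of size-k combinations with replacement from l, in lexicographic order,
-- each multiplied into the accumulator p
def gen : List Int → Nat → Int → List Int
  | _, 0, p => [p]
  | [], _ + 1, _ => []
  | x :: xs, k + 1, p => gen (x :: xs) k (p * x) ++ gen xs (k + 1) p
termination_by l k _ => (k, l.length)

-- canonical start offsets into gen x k 1 (offset of the suffix's block, from base b)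
def sts (k : Nat) : Int → List Int → List Int
  | _, [] => []
  | b, y :: ys =>
    b :: sts k (b + (((gen (y :: ys) k 1).length : Int) - ((gen ys k 1).length : Int))) ys

-- invariant linking a start list to cur: each listed offset is nonneg and cuts cur
-- at exactly the suffix's product block
def Agreed (k : Nat) (cur : List Int) : List Int → List Int → Prop
  | [], _ => True
  | _ :: _, [] => True
  | y :: ys, s :: ss => (0 ≤ s ∧ cur.drop s.toNat = gen (y :: ys) k 1) ∧ Agreed k cur ys ss

theorem cwr_cons (x : Int) (xs : List Int) (r : Nat) :
    cwr (x :: xs) (r + 1) = (cwr (x :: xs) r).map (fun c => x :: c) ++ cwr xs (r + 1) := by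
  rw [cwr]

theorem gen_zero (l : List Int) (p : Int) : gen l 0 p = [p] := by simp [gen]

theorem gen_cons (x : Int) (xs : List Int) (k : Nat) (p : Int) :
    gen (x :: xs) (k + 1) p = gen (x :: xs) k (p * x) ++ gen xs (k + 1) p := by
  rw [gen]

theorem sts_cons (k : Nat) (b : Int) (y : Int) (ys : List Int) :
    sts k b (y :: ys)
      = b :: sts k (b + (((gen (y :: ys) k 1).length : Int) - ((gen ys k 1).length : Int))) ys := by
  rw [sts]

theorem cwr_map_foldl (k : Nat) : ∀ (l : List Int) (p : Int),
    (cwr l k).map (fun c => c.foldl (· * ·) p) = gen l k p := by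
  induction k with
  | zero => intro l p; simp [cwr, gen]
  | succ k ih =>
    intro l
    induction l with
    | nil => intro p; simp [cwr, gen]
    | cons x xs ihl =>
      intro p
      rw [cwr_cons, List.map_append, List.map_map, gen_cons]
      congr 1
      · rw [← ih (x :: xs) (p * x)]
        apply List.map_congr_left
        intro c _
        rfl
      · exact ihl p

theorem reduceMul_eq_foldl_one : ∀ c : List Int, reduceMul c = c.foldl (· * ·) 1 := by
  intro c
  cases c with
  | nil => rfl
  | cons x xs => simp [reduceMul]

theorem map_reduceMul_cwr (l : List Int) (k : Nat) :
    (cwr l k).map reduceMul = gen l k 1 := by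
  rw [← cwr_map_foldl k l 1]
  exact List.map_congr_left (fun c _ => reduceMul_eq_foldl_one c)

theorem gen_scale : ∀ (k : Nat) (l : List Int) (a p : Int),
    gen l k (a * p) = (gen l k p).map (fun q => a * q) := by
  intro k
  induction k with
  | zero => intro l a p; simp [gen]
  | succ k ih =>
    intro l
    induction l with
    | nil => intro a p; simp [gen]
    | cons x xs ihl =>
      intro a p
      rw [gen_cons, gen_cons, List.map_append, mul_assoc, ih (x :: xs) a (p * x), ihl a p]

theorem gen_succ (k : Nat) (x : Int) (xs : List Int) :
    gen (x :: xs) (k + 1) 1 = (gen (x :: xs) k 1).map (fun q => x * q) ++ gen xs (k + 1) 1 := by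
  rw [gen_cons]
  congr 1
  rw [show (1 : Int) * x = x * 1 by ring, gen_scale]

theorem gen_one : ∀ l : List Int, gen l 1 1 = l := by
  intro l
  induction l with
  | nil => simp [gen]
  | cons x xs ih =>
    rw [show gen (x :: xs) 1 1 = gen (x :: xs) 0 (1 * x) ++ gen xs 1 1 from gen_cons x xs 0 1,
      gen_zero, ih]
    simp

-- gen over a tail is a suffix of gen over the whole list
theorem gen_suffix (k : Nat) (y : Int) (ys : List Int) :
    ∃ pre : List Int, gen (y :: ys) k 1 = pre ++ gen ys k 1 := by
  cases k with
  | zero => exact ⟨[], by simp [gen]⟩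
  | succ k => exact ⟨(gen (y :: ys) k 1).map (fun q => y * q), gen_succ k y ys⟩

theorem length_sts (k : Nat) : ∀ (l : List Int) (b : Int), (sts k b l).length = l.length := by
  intro l
  induction l with
  | nil => intro b; rfl
  | cons y ys ih => intro b; rw [sts_cons]; simp [ih]

theorem agreed_sts : ∀ (l : List Int) (k : Nat) (b : Int) (cur : List Int),
    0 ≤ b → cur.drop b.toNat = gen l k 1 → Agreed k cur l (sts k b l) := by
  intro l
  induction l with
  | nil => intro k b cur _ _; trivial
  | cons y ys ih =>
    intro k b cur hb hdrop
    obtain ⟨pre, hpre⟩ := gen_suffix k y ys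
    have hΔ : ((gen (y :: ys) k 1).length : Int) - ((gen ys k 1).length : Int)
        = (pre.length : Int) := by
      rw [hpre]; simp [List.length_append]
    rw [sts_cons, hΔ]
    simp only [Agreed]
    refine ⟨⟨hb, hdrop⟩, ?_⟩
    apply ih k (b + (pre.length : Int)) cur (by positivity)
    have hb' : cur.drop ((b + (pre.length : Int)).toNat)
        = (cur.drop b.toNat).drop pre.length := by
      rw [List.drop_drop]; congr 1; omega
    rw [hb', hdrop, hpre, List.drop_left]

theorem inner_spec (k : Nat) (cur : List Int) :
    ∀ (l st acc accS : List Int),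
    Agreed k cur l st → l.length ≤ st.length →
    (l.zip st).foldl (innerStepB cur) (acc, accS)
      = (acc ++ gen l (k + 1) 1, accS ++ sts (k + 1) (acc.length : Int) l) := by
  intro l
  induction l with
  | nil => intro st acc accS _ _; simp [gen, sts]
  | cons y ys ih =>
    intro st acc accS hag hlen
    cases st with
    | nil => simp at hlen
    | cons s ss =>
      simp only [Agreed] at hag
      obtain ⟨⟨hs, hdrop⟩, hag'⟩ := hag
      rw [List.zip_cons_cons, List.foldl_cons]
      have hstep : innerStepB cur (acc, accS) (y, s)
          = (acc ++ (gen (y :: ys) k 1).map (fun q => y * q), accS ++ [(acc.length : Int)]) := by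
        simp only [innerStepB]
        rw [PySem.List.slice_from cur hs, hdrop]
      rw [hstep, ih ss _ _ hag' (by simpa using hlen)]
      have hΔ : ((gen (y :: ys) (k + 1) 1).length : Int) - ((gen ys (k + 1) 1).length : Int)
          = (((gen (y :: ys) k 1).map (fun q => y * q)).length : Int) := by
        rw [gen_succ]; simp [List.length_append]
      have hlen2 : (((acc ++ (gen (y :: ys) k 1).map (fun q => y * q)).length : Int))
          = (acc.length : Int) + (((gen (y :: ys) k 1).map (fun q => y * q)).length : Int) := by
        simp [List.length_append]
      rw [Prod.mk.injEq]
      constructor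
      · rw [List.append_assoc, gen_succ]
      · rw [List.append_assoc, List.singleton_append, sts_cons, hΔ, hlen2]

theorem sts_one : ∀ (l : List Int) (b : Int),
    sts 1 b l = PySem.List.pyRange b (b + (l.length : Int)) 1 := by
  intro l
  induction l with
  | nil =>
    intro b
    rw [show sts 1 b ([] : List Int) = [] from rfl]
    rw [PySem.List.pyRange_one_eq_nil (by simp)]
  | cons y ys ih =>
    intro b
    rw [sts_cons, gen_one, gen_one]
    have h1 : (((y :: ys).length : Int)) - ((ys.length : Int)) = 1 := by simp
    have h2 : b + (((y :: ys).length : Int)) = (b + 1) + ((ys.length : Int)) := by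
      push_cast [List.length_cons]; omega
    rw [h1, ih, h2, ← PySem.List.pyRange_one_cons (by omega)]

theorem outer_spec (x : List Int) : ∀ (M : Nat),
    ((List.range M).foldl (fun out (j : Nat) => stepA x out ((0 : Int) + (j : Int))) x
      = (((List.range M).foldl (fun st (j : Nat) => stepB x st ((0 : Int) + (j : Int)))
          (x, x, PySem.List.pyRange 0 (x.length : Int) 1)).1))
    ∧ ((List.range M).foldl (fun st (j : Nat) => stepB x st ((0 : Int) + (j : Int)))
          (x, x, PySem.List.pyRange 0 (x.length : Int) 1)).2.1 = gen x (M + 1) 1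
    ∧ ((List.range M).foldl (fun st (j : Nat) => stepB x st ((0 : Int) + (j : Int)))
          (x, x, PySem.List.pyRange 0 (x.length : Int) 1)).2.2 = sts (M + 1) 0 x := by
  intro M
  induction M with
  | zero =>
    refine ⟨rfl, (gen_one x).symm, ?_⟩
    rw [sts_one x 0]
    simp
  | succ M ih =>
    obtain ⟨ih1, ih2, ih3⟩ := ih
    rw [List.range_succ, List.foldl_append, List.foldl_append]
    simp only [List.foldl_cons, List.foldl_nil]
    set st := (List.range M).foldl (fun st (j : Nat) => stepB x st ((0 : Int) + (j : Int)))
          (x, x, PySem.List.pyRange 0 (x.length : Int) 1) with hst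
    have hinner : (x.zip st.2.2).foldl (innerStepB st.2.1) ([], [])
        = (gen x (M + 2) 1, sts (M + 2) 0 x) := by
      rw [ih3, ih2]
      have := inner_spec (M + 1) (gen x (M + 1) 1) x (sts (M + 1) 0 x) [] []
        (agreed_sts x (M + 1) 0 (gen x (M + 1) 1) le_rfl (by simp))
        (by rw [length_sts])
      simpa using this
    have hBstep : stepB x st ((0 : Int) + (M : Int))
        = (st.1 ++ gen x (M + 2) 1, gen x (M + 2) 1, sts (M + 2) 0 x) := by
      show (st.1 ++ ((x.zip st.2.2).foldl (innerStepB st.2.1) ([], [])).1,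
            ((x.zip st.2.2).foldl (innerStepB st.2.1) ([], [])).1,
            ((x.zip st.2.2).foldl (innerStepB st.2.1) ([], [])).2) = _
      rw [hinner]
    refine ⟨?_, ?_, ?_⟩
    · rw [hBstep]
      show (((List.range M).foldl (fun out (j : Nat) => stepA x out ((0 : Int) + (j : Int))) x)
              ++ (cwr x (((0 : Int) + (M : Int)) + 2).toNat).map reduceMul) = _
      rw [ih1]
      congr 1
      rw [show (((0 : Int) + (M : Int)) + 2).toNat = M + 2 by omega]
      exact map_reduceMul_cwr x (M + 2)
    · rw [hBstep]
    · rw [hBstep]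

-- ===== VERDICT (by name: the statement is the Claim_ definition above) =====
theorem expand_expression_spec : Claim_equal_expand_expression := by
  intro input_x dim _
  unfold Spec_expand_expression expand_expression expand_expression_alt
  rw [PySem.List.pyRange_one, List.foldl_map, List.foldl_map]
  exact (outer_spec input_x (dim - 1 - 0).toNat).1
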